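-- pv_equiv track=rewrite | github.com/oshah81/PicoExperiments | testleds.py | process_pattern_txt
-- ===== SOURCE A (Python) =====
-- def process_pattern_txt(pattern: str) -> list[bool]:
--     flag = False
--     frame = []
--     row = []
--     depth = []
--     col = []
--     for c in pattern:
--         if c == " ":
--             if not flag:
--                 flag = True
--                 depth.append(col)
--                 col = []
--             else:
--                 flag = False
--                 row.append(depth)
--                 depth = []
--                 col = []
--                 continue
--         else:
--             flag = False
--
--         if c == "0":
--             col.append(False)
--             continue
--         if c == "1":
--             col.append(True)
--             continue
--         if c == "\r":
--             continue
--         if c == "\n":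
--             if len(depth) > 0:
--                 row.append(depth)
--
--             frame.append(row)
--             row = []
--             depth = []
--             col = []
--             continue
--
--     if len(depth) > 0:
--         row.append(depth)
--
--     frame.append(row)
--     return frame
-- ===== SOURCE B (Python) =====
-- def _parse_line(line):
--     # per-line state machine: spaces alternate between flushing the pending
--     # column into depth and flushing depth into the row; any non-space
--     # character resets that alternation; the trailing pending column is dropped.
--     flag = False
--     row = []
--     depth = []
--     col = []
--     for c in line:
--         if c == " ":
--             if flag:
--                 flag = False
--                 row.append(depth)
--                 depth = []
--                 col = []
--             else:
--                 flag = True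
--                 depth.append(col)
--                 col = []
--         elif c == "0":
--             flag = False
--             col.append(False)
--         elif c == "1":
--             flag = False
--             col.append(True)
--         else:
--             flag = False
--     if depth:
--         row.append(depth)
--     return row
--
--
-- def process_pattern_txt(pattern: str) -> list[bool]:
--     return [_parse_line(line) for line in pattern.split("\n")]
-- ===== Notes on version B (the rewrite author's own statement) =====
-- stated objective: simpler
-- what changed: B splits the pattern on '\n' and parses each line independently with a per-line state machine (split + map over lines), replacing A's single monolithic loop that interleaves frame management, the inline '\n' flush branch and the trailing flush.
import Mathlib
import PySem

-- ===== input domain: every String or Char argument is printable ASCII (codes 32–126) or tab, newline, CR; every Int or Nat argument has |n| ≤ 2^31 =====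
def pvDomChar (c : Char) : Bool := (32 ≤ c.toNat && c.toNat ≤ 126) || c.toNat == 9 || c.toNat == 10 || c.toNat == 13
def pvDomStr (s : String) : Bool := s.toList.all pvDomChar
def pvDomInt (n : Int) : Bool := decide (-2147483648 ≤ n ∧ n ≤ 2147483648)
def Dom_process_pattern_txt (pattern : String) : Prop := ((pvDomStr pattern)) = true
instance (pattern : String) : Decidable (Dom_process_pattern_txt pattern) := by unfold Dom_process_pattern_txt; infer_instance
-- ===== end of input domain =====

-- B processes the pattern as independent newline-delimited segments (split + map)
-- instead of A's single monolithic loop with an inline '\n' branch; objective: simpler decomposition.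


-- ===== PORT A =====
-- state: (flag, frame, row, depth, col), exactly A's variables
def pvStepA (st : Bool × List (List (List (List Bool))) × List (List (List Bool)) × List (List Bool) × List Bool)
    (c : Char) : Bool × List (List (List (List Bool))) × List (List (List Bool)) × List (List Bool) × List Bool :=
  match st with
  | (flag, frame, row, depth, col) =>
    if c = ' ' then
      -- first space of a pair flushes col into depth (then falls through the bit checks, all no-ops for ' ')
      if flag = false then (true, frame, row, depth ++ [col], [])
      else (false, frame, row ++ [depth], [], [])
    else if c = '0' then (false, frame, row, depth, col ++ [false])
    else if c = '1' then (false, frame, row, depth, col ++ [true])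
    else if c = '\r' then (false, frame, row, depth, col)
    else if c = '\n' then
      (false, frame ++ [if 0 < depth.length then row ++ [depth] else row], [], [], [])
    else (false, frame, row, depth, col)

def process_pattern_txt (pattern : String) : List (List (List (List Bool))) :=
  match pattern.toList.foldl pvStepA (false, [], [], [], []) with
  | (_, frame, row, depth, _) => frame ++ [if 0 < depth.length then row ++ [depth] else row]

-- ===== PORT B =====
-- per-line state: (flag, row, depth, col); no frame, no '\n' case
def pvStepB (st : Bool × List (List (List Bool)) × List (List Bool) × List Bool)
    (c : Char) : Bool × List (List (List Bool)) × List (List Bool) × List Bool :=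
  match st with
  | (flag, row, depth, col) =>
    if c = ' ' then
      if flag then (false, row ++ [depth], [], [])
      else (true, row, depth ++ [col], [])
    else if c = '0' then (false, row, depth, col ++ [false])
    else if c = '1' then (false, row, depth, col ++ [true])
    else (false, row, depth, col)

def pvParseLine (line : List Char) : List (List (List Bool)) :=
  match line.foldl pvStepB (false, [], [], []) with
  | (_, row, depth, _) => if depth = [] then row else row ++ [depth]

-- pattern.split('\n') ported as List.splitOn '\n' on the characters (exact for a 1-char separator)
def process_pattern_txt_alt (pattern : String) : List (List (List (List Bool))) :=
  (pattern.toList.splitOn '\n').map pvParseLine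

-- ===== PRECONDITION & SPEC =====
def Spec_process_pattern_txt (pattern : String) (out : List (List (List (List Bool)))) : Prop := out = process_pattern_txt_alt pattern
instance (pattern : String) (out : List (List (List (List Bool)))) : Decidable (Spec_process_pattern_txt pattern out) := by unfold Spec_process_pattern_txt; infer_instance

-- ===== CLAIM (what is proved, stated in full; the proofs are below) =====
def Claim_equal_process_pattern_txt : Prop := ∀ (pattern : String), Dom_process_pattern_txt pattern → Spec_process_pattern_txt pattern (process_pattern_txt pattern)

-- ===== LEMMAS AND PROOFS =====

-- proof-only recursive splitter, equal to List.splitOn '\n'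
def pvLines : List Char → List (List Char)
  | [] => [[]]
  | c :: cs => if c = '\n' then [] :: pvLines cs else (pvLines cs).modifyHead (c :: ·)

lemma pvLines_ne_nil (cs : List Char) : pvLines cs ≠ [] := by
  induction cs with
  | nil => simp [pvLines]
  | cons c cs ih =>
    simp only [pvLines]
    split
    · simp
    · cases h : pvLines cs with
      | nil => exact absurd h ih
      | cons l ls => simp [List.modifyHead]

lemma pvLines_eq_splitOn (cs : List Char) : pvLines cs = cs.splitOn '\n' := by
  induction cs with
  | nil => simp [pvLines]
  | cons c cs ih =>
    rw [List.splitOn, List.splitOnP_cons]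
    simp only [pvLines, ih, List.splitOn]
    split
    · simp_all
    · simp_all [beq_iff_eq]

-- the two flush forms agree
lemma pvFlush_eq (row : List (List (List Bool))) (depth : List (List Bool)) :
    (if 0 < depth.length then row ++ [depth] else row) = (if depth = [] then row else row ++ [depth]) := by
  cases depth <;> simp

-- the per-character steps agree on every non-newline character
lemma pvStep_agree (flag : Bool) (frame : List (List (List (List Bool))))
    (row : List (List (List Bool))) (depth : List (List Bool)) (col : List Bool)
    (c : Char) (hc : c ≠ '\n') :
    pvStepA (flag, frame, row, depth, col) c =
      match pvStepB (flag, row, depth, col) c with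
      | (flag', row', depth', col') => (flag', frame, row', depth', col') := by
  simp only [pvStepA, pvStepB]
  by_cases h1 : c = ' ' <;> by_cases h2 : c = '0' <;> by_cases h3 : c = '1' <;>
    by_cases h4 : c = '\r' <;> cases flag <;> simp_all

-- main invariant: running A's loop-and-flush from any state equals the already-emitted
-- frame plus B's per-line results, the first line continuing from the carried state
lemma pv_key : ∀ (cs : List Char) (flag : Bool) (frame : List (List (List (List Bool))))
    (row : List (List (List Bool))) (depth : List (List Bool)) (col : List Bool)
    (l : List Char) (ls : List (List Char)), pvLines cs = l :: ls →
    (match cs.foldl pvStepA (flag, frame, row, depth, col) with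
     | (_, frame', row', depth', _) => frame' ++ [if 0 < depth'.length then row' ++ [depth'] else row']) =
    frame ++ ((match l.foldl pvStepB (flag, row, depth, col) with
               | (_, row', depth', _) => if depth' = [] then row' else row' ++ [depth']) :: ls.map pvParseLine) := by
  intro cs
  induction cs with
  | nil =>
    intro flag frame row depth col l ls h
    simp only [pvLines] at h
    cases h
    simp [List.foldl, pvFlush_eq]
  | cons c cs ih =>
    intro flag frame row depth col l ls h
    by_cases hc : c = '\n'
    · subst hc
      simp only [pvLines] at h
      cases h
      obtain ⟨l', ls', h'⟩ : ∃ l' ls', pvLines cs = l' :: ls' := by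
        cases hx : pvLines cs with
        | nil => exact absurd hx (pvLines_ne_nil cs)
        | cons a b => exact ⟨a, b, rfl⟩
      have hstep : (('\n' :: cs).foldl pvStepA (flag, frame, row, depth, col)) =
          cs.foldl pvStepA (false, frame ++ [if 0 < depth.length then row ++ [depth] else row], [], [], []) := by
        simp [List.foldl, pvStepA]
      rw [hstep, ih false _ [] [] [] l' ls' h']
      simp [pvParseLine, h', pvFlush_eq, List.foldl]
    · simp only [pvLines, if_neg hc] at h
      obtain ⟨l', ls', h'⟩ : ∃ l' ls', pvLines cs = l' :: ls' := by
        cases hx : pvLines cs with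
        | nil => exact absurd hx (pvLines_ne_nil cs)
        | cons a b => exact ⟨a, b, rfl⟩
      rw [h', List.modifyHead] at h
      injection h with h1 h2
      subst h1
      subst h2
      have hA := pvStep_agree flag frame row depth col c hc
      cases hB : pvStepB (flag, row, depth, col) c with
      | mk flag' rest =>
        obtain ⟨row', depth', col'⟩ := rest
        rw [hB] at hA
        simp only [List.foldl, hA, hB]
        exact ih flag' frame row' depth' col' l' ls' h'

-- ===== VERDICT (by name: the statement is the Claim_ definition above) =====
theorem process_pattern_txt_spec : Claim_equal_process_pattern_txt := by
  intro pattern _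
  unfold Spec_process_pattern_txt process_pattern_txt process_pattern_txt_alt
  obtain ⟨l, ls, h⟩ : ∃ l ls, pvLines pattern.toList = l :: ls := by
    cases hx : pvLines pattern.toList with
    | nil => exact absurd hx (pvLines_ne_nil _)
    | cons a b => exact ⟨a, b, rfl⟩
  rw [← pvLines_eq_splitOn, h]
  have key := pv_key pattern.toList false [] [] [] [] l ls h
  rcases hfold : List.foldl pvStepA (false, [], [], [], []) pattern.toList with ⟨f, frame, row, depth, col⟩
  rw [hfold] at key
  simp only [List.nil_append] at key
  simpa [pvParseLine] using key
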